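-- pv_equiv track=rewrite | github.com/EricX003/ALISON | Utils.py | countSkip
-- ===== SOURCE A (Python) =====
-- def countSkip(skipgram, texts):
--
--     total = 0
--     m = len(skipgram)
--
--     for text in texts:
--
--         n = len(text)
--
--         mat = [[0 for i in range(n + 1)] for j in range(m + 1)]
--         for j in range(n + 1):
--             mat[0][j] = 1
--
--         for i in range(1, m + 1):
--             for j in range(1, n + 1):
--                 mat[i][j] = mat[i][j - 1]
--
--                 if skipgram[i - 1] == text[j - 1]:
--                     mat[i][j] += mat[i - 1][j - 1]
--
--         total += mat[m][n]
--
--     return total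
-- ===== SOURCE B (Python) =====
-- def countSkip(skipgram, texts):
--     total = 0
--     for text in texts:
--         pos = {}
--         for idx, ch in enumerate(text):
--             pos.setdefault(ch, []).append(idx)
--         cur = [(-1, 1)]
--         for ch in skipgram:
--             new = []
--             run = 0
--             k = 0
--             for p in pos.get(ch, []):
--                 while k < len(cur) and cur[k][0] < p:
--                     run += cur[k][1]
--                     k += 1
--                 new.append((p, run))
--             cur = new
--         total += sum(c for _, c in cur)
--     return total
-- ===== Notes on version B (the rewrite author's own statement) =====
-- stated objective: faster
-- what changed: Replaced the (m+1)x(n+1) DP matrix with an occurrence-list algorithm: a hash index char->positions is built once per text, then for each skipgram character a two-pointer merge with a running prefix sum turns the list of (position, ways) pairs for the previous prefix into the list for the next prefix, so the inner scan over all n columns disappears.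
import Mathlib
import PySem

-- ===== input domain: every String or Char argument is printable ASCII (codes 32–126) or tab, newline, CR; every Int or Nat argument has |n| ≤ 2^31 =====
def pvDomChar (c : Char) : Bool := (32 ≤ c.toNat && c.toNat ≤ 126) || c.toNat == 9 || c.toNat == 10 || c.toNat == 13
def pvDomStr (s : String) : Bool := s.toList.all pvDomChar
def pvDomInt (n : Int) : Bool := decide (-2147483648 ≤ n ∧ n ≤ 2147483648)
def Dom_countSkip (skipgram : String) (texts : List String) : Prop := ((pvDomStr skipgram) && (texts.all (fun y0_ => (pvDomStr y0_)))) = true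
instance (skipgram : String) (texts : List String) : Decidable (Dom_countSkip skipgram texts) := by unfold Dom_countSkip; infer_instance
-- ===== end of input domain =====

-- B replaces A's (m+1)×(n+1) DP matrix by an occurrence-list algorithm: a char→positions
-- index built once per text, then per skipgram character a two-pointer merge with a running
-- prefix sum over (position, ways) pairs; same return value.

-- ===== PORT A =====
-- literal port of A: full 2D table, row 0 set to ones, then rows 1..m filled column by column
def countSkip (skipgram : String) (texts : List String) : Int :=
  let s := skipgram.toList
  let m := s.length
  texts.foldl (fun total text =>
    let t := text.toList
    let n := t.length
    let mat : List (List Int) := List.replicate (m+1) (List.replicate (n+1) (0:Int))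
    let mat := (List.range (n+1)).foldl (fun mat j => mat.set 0 ((mat.getD 0 []).set j 1)) mat
    let mat := (List.range' 1 m).foldl (fun mat i =>
      (List.range' 1 n).foldl (fun mat j =>
        let row := mat.getD i []
        let v := row.getD (j-1) 0 +
          (if s.getD (i-1) ' ' = t.getD (j-1) ' ' then (mat.getD (i-1) []).getD (j-1) 0 else 0)
        mat.set i (row.set j v)) mat) mat
    total + (mat.getD m []).getD n 0) 0

-- ===== PORT B =====
-- the 'while k < len(cur) and cur[k][0] < p' pointer advance of Source B, as structural recursion
def pvAdvance : List (Int × Int) → Int → Int → List (Int × Int) × Int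
  | [], run, _ => ([], run)
  | (q, c) :: rest, run, p => if q < p then pvAdvance rest (run + c) p else ((q, c) :: rest, run)

-- literal port of B: build pos : char → occurrence positions, then per skipgram char a
-- two-pointer merge producing the next list of (position, ways) pairs
def countSkip_alt (skipgram : String) (texts : List String) : Int :=
  texts.foldl (fun total text =>
    let t := text.toList
    let pos := (PySem.List.enumerate t 0).foldl
        (fun d ic => d.modify ic.2 ([] : List Int) (fun l => l ++ [ic.1])) PySem.Dict.empty
    let cur := skipgram.toList.foldl
        (fun cur ch =>
          ((pos.getD ch []).foldl
            (fun acc p =>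
              let r := pvAdvance acc.2.1 acc.2.2 p
              (acc.1 ++ [(p, r.2)], r.1, r.2))
            (([] : List (Int × Int)), cur, (0 : Int))).1)
        [((-1 : Int), (1 : Int))]
    total + cur.foldl (fun s pc => s + pc.2) 0) 0

-- ===== PRECONDITION & SPEC =====
def Spec_countSkip (skipgram : String) (texts : List String) (out : Int) : Prop := out = countSkip_alt skipgram texts
instance (skipgram : String) (texts : List String) (out : Int) : Decidable (Spec_countSkip skipgram texts out) := by unfold Spec_countSkip; infer_instance

-- ===== CLAIM (what is proved, stated in full; the proofs are below) =====
def Claim_equal_countSkip : Prop := ∀ (skipgram : String) (texts : List String), Dom_countSkip skipgram texts → Spec_countSkip skipgram texts (countSkip skipgram texts)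

-- ===== LEMMAS AND PROOFS =====

-- reference value: number of occurrences of s[:i] as a subsequence of t[:j]
def Pfun (s t : List Char) : Nat → Nat → Int
  | 0, _ => 1
  | _+1, 0 => 0
  | i+1, j+1 => Pfun s t (i+1) j + (if s.getD i ' ' = t.getD j ' ' then Pfun s t i j else 0)
termination_by i j => (i, j)

theorem Pfun_zero (s t : List Char) (j : Nat) : Pfun s t 0 j = 1 := by cases j <;> simp [Pfun]

theorem Pfun_succ_zero (s t : List Char) (i : Nat) : Pfun s t (i+1) 0 = 0 := by simp [Pfun]

theorem Pfun_succ_succ (s t : List Char) (i j : Nat) :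
    Pfun s t (i+1) (j+1) = Pfun s t (i+1) j + (if s.getD i ' ' = t.getD j ' ' then Pfun s t i j else 0) := by
  simp [Pfun]

theorem getD_set_lem {α : Type} (l : List α) (i j : Nat) (v d : α) (hi : i < l.length) :
    (l.set i v).getD j d = if i = j then v else l.getD j d := by
  simp only [List.getD_eq_getElem?_getD, List.getElem?_set, hi, if_true]
  rcases eq_or_ne i j with h | h
  · subst h; simp
  · simp [h]

theorem getD_replicate_zero (n j : Nat) : (List.replicate n (0:Int)).getD j 0 = 0 := by
  simp only [List.getD_eq_getElem?_getD, List.getElem?_replicate]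
  split_ifs <;> rfl

-- ----- A side -----

-- row-i inner pass of A over columns range' a b
theorem arow (s t : List Char) (i : Nat) (hi : 1 ≤ i) (him : i ≤ s.length) :
    ∀ (b a : Nat) (mat : List (List Int)), 1 ≤ a → a + b ≤ t.length + 1 →
    mat.length = s.length + 1 →
    (mat.getD i []).length = t.length + 1 →
    (∀ j, j ≤ t.length → (mat.getD (i-1) []).getD j 0 = Pfun s t (i-1) j) →
    (∀ j, j < a → (mat.getD i []).getD j 0 = Pfun s t i j) →
    (let mat' := (List.range' a b).foldl (fun mat j =>
        let row := mat.getD i []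
        let v := row.getD (j-1) 0 +
          (if s.getD (i-1) ' ' = t.getD (j-1) ' ' then (mat.getD (i-1) []).getD (j-1) 0 else 0)
        mat.set i (row.set j v)) mat
     mat'.length = mat.length ∧ (∀ k, k ≠ i → mat'.getD k [] = mat.getD k []) ∧
     (mat'.getD i []).length = t.length + 1 ∧
     (∀ j, j < a + b → (mat'.getD i []).getD j 0 = Pfun s t i j)) := by
  intro b
  induction b with
  | zero =>
    intro a mat _ _ hmlen hrlen _ hrow
    exact ⟨rfl, fun _ _ => rfl, hrlen, fun j hj => hrow j (by omega)⟩
  | succ b ih =>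
    intro a mat ha hab hmlen hrlen hprev hrow
    rw [List.range'_succ, List.foldl_cons]
    have hiL : i < mat.length := by omega
    have haT : a ≤ t.length := by omega
    set row := mat.getD i [] with hrowdef
    set v := row.getD (a-1) 0 +
        (if s.getD (i-1) ' ' = t.getD (a-1) ' ' then (mat.getD (i-1) []).getD (a-1) 0 else 0) with hvdef
    set mat1 := mat.set i (row.set a v) with hmat1
    have hv : v = Pfun s t i a := by
      match i, hi, a, ha with
      | (i'+1), _, (a''+1), _ =>
        rw [hvdef, Pfun_succ_succ]
        simp only [Nat.add_sub_cancel]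
        rw [hrow a'' (by omega)]
        have hp := hprev a'' (by omega)
        simp only [Nat.add_sub_cancel] at hp
        rw [hp]
    have hm1row : mat1.getD i [] = row.set a v := by
      rw [hmat1, getD_set_lem mat i i _ [] hiL, if_pos rfl]
    have hm1other : ∀ k, k ≠ i → mat1.getD k [] = mat.getD k [] := by
      intro k hk
      rw [hmat1, getD_set_lem mat i k _ [] hiL, if_neg (fun h => hk h.symm)]
    have hm1len : mat1.length = mat.length := by rw [hmat1]; simp
    have hrlen1 : (mat1.getD i []).length = t.length + 1 := by rw [hm1row]; simp [hrlen]
    have hrow1 : ∀ j, j < a + 1 → (mat1.getD i []).getD j 0 = Pfun s t i j := by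
      intro j hj
      rw [hm1row, getD_set_lem row a j v 0 (by omega)]
      by_cases hja : a = j
      · rw [if_pos hja, hv, hja]
      · rw [if_neg hja]
        exact hrow j (by omega)
    have hprev1 : ∀ j, j ≤ t.length → (mat1.getD (i-1) []).getD j 0 = Pfun s t (i-1) j := by
      intro j hj
      rw [hm1other (i-1) (by omega)]
      exact hprev j hj
    obtain ⟨c1, c2, c3, c4⟩ := ih (a+1) mat1 (by omega) (by omega) (by omega) hrlen1 hprev1 hrow1
    refine ⟨by rw [c1, hm1len], ?_, c3, ?_⟩
    · intro k hk
      rw [c2 k hk, hm1other k hk]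
    · intro j hj
      exact c4 j (by omega)

-- rows a..a+b-1 of A's matrix, given rows < a are done and rows ≥ a are still zero
theorem aouter (s t : List Char) :
    ∀ (b a : Nat) (mat : List (List Int)), 1 ≤ a → a + b ≤ s.length + 1 →
    mat.length = s.length + 1 →
    (∀ k, k < a → ∀ j, j ≤ t.length → (mat.getD k []).getD j 0 = Pfun s t k j) →
    (∀ k, a ≤ k → k ≤ s.length → mat.getD k [] = List.replicate (t.length + 1) (0:Int)) →
    (∀ k, k < a + b → ∀ j, j ≤ t.length →
      ((((List.range' a b).foldl (fun mat i =>
        (List.range' 1 t.length).foldl (fun mat j =>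
          let row := mat.getD i []
          let v := row.getD (j-1) 0 +
            (if s.getD (i-1) ' ' = t.getD (j-1) ' ' then (mat.getD (i-1) []).getD (j-1) 0 else 0)
          mat.set i (row.set j v)) mat) mat).getD k []).getD j 0 = Pfun s t k j)) := by
  intro b
  induction b with
  | zero =>
    intro a mat _ _ _ hcorr _ k hk j hj
    exact hcorr k (by omega) j hj
  | succ b ih =>
    intro a mat ha hab hmlen hcorr hzero
    rw [List.range'_succ, List.foldl_cons]
    have ham : a ≤ s.length := by omega
    have hzrow : mat.getD a [] = List.replicate (t.length+1) (0:Int) := hzero a (le_refl a) ham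
    obtain ⟨c1, c2, c3, c4⟩ := arow s t a ha ham t.length 1 mat (le_refl 1) (by omega) hmlen
      (by rw [hzrow]; simp)
      (fun j hj => hcorr (a-1) (by omega) j hj)
      (by
        intro j hj
        have hj0 : j = 0 := by omega
        subst hj0
        rw [hzrow, getD_replicate_zero]
        match a, ha with
        | (a''+1), _ => rw [Pfun_succ_zero])
    set mat1 := (List.range' 1 t.length).foldl (fun mat j =>
        let row := mat.getD a []
        let v := row.getD (j-1) 0 +
          (if s.getD (a-1) ' ' = t.getD (j-1) ' ' then (mat.getD (a-1) []).getD (j-1) 0 else 0)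
        mat.set a (row.set j v)) mat with hmat1
    have hres := ih (a+1) mat1 (by omega) (by omega) (by rw [c1, hmlen])
      (by
        intro k hk j hj
        by_cases hka : k = a
        · subst hka
          exact c4 j (by omega)
        · rw [c2 k hka]
          exact hcorr k (by omega) j hj)
      (by
        intro k hk1 hk2
        rw [c2 k (by omega)]
        exact hzero k (by omega) hk2)
    intro k hk j hj
    exact hres k (by omega) j hj

-- A's row-0 initialisation loop
theorem arow0 (m n : Nat) :
    (let mat0 : List (List Int) := List.replicate (m+1) (List.replicate (n+1) (0:Int))
     let mat := (List.range (n+1)).foldl (fun mat j => mat.set 0 ((mat.getD 0 []).set j 1)) mat0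
     mat.length = m + 1 ∧ (∀ j, j ≤ n → (mat.getD 0 []).getD j 0 = 1) ∧
     (∀ k, 1 ≤ k → k ≤ m → mat.getD k [] = List.replicate (n+1) (0:Int))) := by
  have aux : ∀ k, k ≤ n+1 →
      (let mat := (List.range k).foldl (fun mat j => mat.set 0 ((mat.getD 0 []).set j 1))
        (List.replicate (m+1) (List.replicate (n+1) (0:Int)))
       mat.length = m+1 ∧ (mat.getD 0 []).length = n+1 ∧
       (∀ j, (mat.getD 0 []).getD j 0 = if j < k then 1 else 0) ∧
       (∀ kk, 1 ≤ kk → kk ≤ m → mat.getD kk [] = List.replicate (n+1) (0:Int))) := by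
    intro k
    induction k with
    | zero =>
      intro _
      simp only [List.range_zero, List.foldl_nil]
      have hrow0 : ((List.replicate (m+1) (List.replicate (n+1) (0:Int))).getD 0 []) =
          List.replicate (n+1) (0:Int) := by
        simp [List.getD_eq_getElem?_getD]
      refine ⟨by simp, by rw [hrow0]; simp, ?_, ?_⟩
      · intro j
        rw [hrow0, getD_replicate_zero, if_neg (by omega)]
      · intro kk _ hkkm
        simp [List.getD_eq_getElem?_getD, Nat.lt_succ_of_le hkkm]
    | succ k ihk =>
      intro hk
      obtain ⟨d1, d2, d3, d4⟩ := ihk (by omega)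
      rw [List.range_succ, List.foldl_append, List.foldl_cons, List.foldl_nil]
      set matk := (List.range k).foldl (fun mat j => mat.set 0 ((mat.getD 0 []).set j 1))
        (List.replicate (m+1) (List.replicate (n+1) (0:Int))) with hmatk
      have h0L : 0 < matk.length := by omega
      have hnew : (matk.set 0 ((matk.getD 0 []).set k 1)).getD 0 [] = (matk.getD 0 []).set k 1 := by
        rw [getD_set_lem matk 0 0 _ [] h0L, if_pos rfl]
      refine ⟨by simp [d1], by rw [hnew, List.length_set, d2], ?_, ?_⟩
      · intro j
        rw [hnew, getD_set_lem _ k j 1 0 (by omega)]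
        by_cases hkj : k = j
        · rw [if_pos hkj, if_pos (by omega)]
        · rw [if_neg hkj, d3 j]
          by_cases hlt : j < k
          · rw [if_pos hlt, if_pos (by omega)]
          · rw [if_neg hlt, if_neg (by omega)]
      · intro kk hkk hkkm
        rw [getD_set_lem matk 0 kk _ [] h0L, if_neg (by omega)]
        exact d4 kk hkk hkkm
  obtain ⟨e1, e2, e3, e4⟩ := aux (n+1) (le_refl _)
  exact ⟨e1, fun j hj => by rw [e3 j, if_pos (by omega)], e4⟩

-- per-text value of A agrees with Pfun
theorem perText (s t : List Char) :
    (let m := s.length; let n := t.length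
     let mat : List (List Int) := List.replicate (m+1) (List.replicate (n+1) (0:Int))
     let mat := (List.range (n+1)).foldl (fun mat j => mat.set 0 ((mat.getD 0 []).set j 1)) mat
     let mat := (List.range' 1 m).foldl (fun mat i =>
       (List.range' 1 n).foldl (fun mat j =>
         let row := mat.getD i []
         let v := row.getD (j-1) 0 +
           (if s.getD (i-1) ' ' = t.getD (j-1) ' ' then (mat.getD (i-1) []).getD (j-1) 0 else 0)
         mat.set i (row.set j v)) mat) mat
     (mat.getD m []).getD n 0) = Pfun s t s.length t.length := by
  obtain ⟨e1, e2, e3⟩ := arow0 s.length t.length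
  have hres := aouter s t s.length 1 _ (le_refl 1) (by omega) e1
      (by
        intro k hk j hj
        have hk0 : k = 0 := by omega
        subst hk0
        rw [e2 j hj, Pfun_zero])
      e3
  exact hres s.length (by omega) t.length (le_refl _)

-- ----- B side -----

-- sum of the counts in a (position, count) list
def sumC (l : List (Int × Int)) : Int := (l.map (·.2)).sum

-- prefix sum of counts whose position is < j
def Scur (cur : List (Int × Int)) (j : Int) : Int :=
  sumC (cur.filter (fun qc => decide (qc.1 < j)))

-- keys strictly ascending
def KSorted (l : List (Int × Int)) : Prop := l.Pairwise (fun a b => a.1 < b.1)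

theorem sumC_append (a b : List (Int × Int)) : sumC (a ++ b) = sumC a + sumC b := by
  simp [sumC]

theorem pvAdvance_spec (p : Int) :
    ∀ (L : List (Int × Int)) (run : Int),
    pvAdvance L run p =
      (L.dropWhile (fun qc => decide (qc.1 < p)),
       run + sumC (L.takeWhile (fun qc => decide (qc.1 < p)))) := by
  intro L
  induction L with
  | nil => intro run; simp [pvAdvance, sumC]
  | cons qc rest ih =>
    intro run
    obtain ⟨q, c⟩ := qc
    by_cases h : q < p
    · simp only [pvAdvance, if_pos h, ih, List.dropWhile_cons, List.takeWhile_cons,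
        decide_eq_true h, if_true]
      refine Prod.ext rfl ?_
      simp only [sumC, List.map_cons, List.sum_cons]
      ring
    · simp [pvAdvance, h, sumC]

theorem filter_eq_takeWhile (p : Int) :
    ∀ (l : List (Int × Int)), KSorted l →
    l.filter (fun qc => decide (qc.1 < p)) = l.takeWhile (fun qc => decide (qc.1 < p)) := by
  intro l
  induction l with
  | nil => intro _; rfl
  | cons a rest ih =>
    intro hs
    have hrest : KSorted rest := (List.pairwise_cons.mp hs).2
    have hall : ∀ b ∈ rest, a.1 < b.1 := (List.pairwise_cons.mp hs).1
    by_cases h : a.1 < p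
    · simp only [List.filter_cons, List.takeWhile_cons, decide_eq_true h, if_true,
        ih hrest]
    · have hnil : List.filter (fun qc => decide (qc.1 < p)) rest = [] :=
        List.filter_eq_nil_iff.mpr (fun b hb => by
          simp only [decide_eq_true_eq]
          have := hall b hb
          omega)
      simp [decide_eq_false h, hnil]

-- the inner two-pointer fold produces (p, prefix-sum below p) for each p
theorem inner_spec (full : List (Int × Int)) (hfs : KSorted full) :
    ∀ (ps : List Int) (done rem : List (Int × Int)) (acc : List (Int × Int)),
    full = done ++ rem →
    ps.Pairwise (· < ·) →
    (∀ p ∈ ps, ∀ qc ∈ done, qc.1 < p) →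
    (ps.foldl (fun acc p =>
        let r := pvAdvance acc.2.1 acc.2.2 p
        (acc.1 ++ [(p, r.2)], r.1, r.2)) (acc, rem, sumC done)).1
      = acc ++ ps.map (fun p => (p, Scur full p)) := by
  intro ps
  induction ps with
  | nil => intro done rem acc _ _ _; simp
  | cons p ps' ih =>
    intro done rem acc hsplit hps hdone
    have hpps' : ∀ p' ∈ ps', p < p' := (List.pairwise_cons.mp hps).1
    have hps' : ps'.Pairwise (· < ·) := (List.pairwise_cons.mp hps).2
    have hremS : KSorted rem := by
      rw [hsplit] at hfs
      exact (List.pairwise_append.mp hfs).2.1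
    set tk := rem.takeWhile (fun qc => decide (qc.1 < p)) with htk
    set dr := rem.dropWhile (fun qc => decide (qc.1 < p)) with hdr
    have hsplit' : full = (done ++ tk) ++ dr := by
      rw [hsplit, htk, hdr, List.append_assoc, List.takeWhile_append_dropWhile]
    have hsum' : sumC done + sumC tk = sumC (done ++ tk) := (sumC_append done tk).symm
    have hval : sumC done + sumC tk = Scur full p := by
      rw [hsum', Scur, hsplit, List.filter_append,
        List.filter_eq_self.mpr
          (fun qc hqc => by simpa using hdone p (by simp) qc hqc),
        filter_eq_takeWhile p rem hremS]
    have hdone' : ∀ p' ∈ ps', ∀ qc ∈ done ++ tk, qc.1 < p' := by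
      intro p' hp' qc hqc
      rcases List.mem_append.mp hqc with h | h
      · exact hdone p' (by simp [hp']) qc h
      · have h1 := List.mem_takeWhile_imp (p := fun qc => decide (qc.1 < p)) (l := rem)
          (htk ▸ h)
        have h2 := hpps' p' hp'
        simp only [decide_eq_true_eq] at h1
        omega
    rw [List.foldl_cons]
    have hhead : (let r := pvAdvance (acc, rem, sumC done).2.1 (acc, rem, sumC done).2.2 p
        ((acc, rem, sumC done).1 ++ [(p, r.2)], r.1, r.2))
        = (acc ++ [(p, Scur full p)], dr, Scur full p) := by
      simp only [pvAdvance_spec, ← htk, ← hdr, hval]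
    rw [hhead]
    have := ih (done ++ tk) dr (acc ++ [(p, Scur full p)]) hsplit' hps' hdone'
    rw [hsum'.symm.trans hval] at this
    rw [this, List.map_cons]
    simp

-- positions of ch in t, as Nats
def posN (t : List Char) (ch : Char) : List Nat :=
  (List.range t.length).filter (fun k => decide (t.getD k ' ' = ch))

-- the dict built by B's first loop is exactly the occurrence index
theorem posChar (t : List Char) (ch : Char) :
    ((PySem.List.enumerate t 0).foldl
        (fun d ic => d.modify ic.2 ([] : List Int) (fun l => l ++ [ic.1]))
        PySem.Dict.empty).getD ch []
      = (posN t ch).map (fun k => ((k : Nat) : Int)) := by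
  rw [show ((PySem.List.enumerate t 0).foldl
        (fun d ic => d.modify ic.2 ([] : List Int) (fun l => l ++ [ic.1]))
        PySem.Dict.empty)
      = (((PySem.List.enumerate t 0).map (fun ic => (ic.2, ic.1))).foldl
        (fun d p => d.modify p.1 ([] : List Int) (fun l => l ++ [p.2]))
        PySem.Dict.empty) from (List.foldl_map (f := fun ic : Int × Char => (ic.2, ic.1))
        (g := fun (d : PySem.Dict Char (List Int)) p => d.modify p.1 ([] : List Int)
          (fun l => l ++ [p.2]))).symm]
  rw [PySem.Dict.getD_foldl_modify_append]
  rw [PySem.List.enumerate_eq_map_pyRange t ' ', PySem.List.len_eq,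
    PySem.List.pyRange_zero_nat]
  simp only [posN, List.map_map, List.filter_map, Function.comp_def,
    PySem.List.pyGetD_natCast, PySem.Dict.getD_empty, List.nil_append]
  rfl

-- 0/1-threshold sums of Pfun values over the positions of s[i] build Pfun at i+1
theorem sum_posN (s t : List Char) (i : Nat) :
    ∀ j : Nat,
    ((((List.range j).filter (fun k => decide (t.getD k ' ' = s.getD i ' '))).map
        (fun k => Pfun s t i k)).sum) = Pfun s t (i+1) j := by
  intro j
  induction j with
  | zero => simp [Pfun_succ_zero]
  | succ j ih =>
    rw [List.range_succ, List.filter_append, List.map_append, List.sum_append, ih,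
      Pfun_succ_succ]
    by_cases h : t.getD j ' ' = s.getD i ' '
    · rw [if_pos h.symm]
      simp only [List.filter_cons, List.filter_nil, decide_eq_true h, if_true,
        List.map_cons, List.map_nil, List.sum_cons, List.sum_nil, add_zero]
    · rw [if_neg (fun hh => h hh.symm)]
      rw [List.filter_cons, decide_eq_false h]
      simp

-- invariant carried through the fold over the skipgram characters
def Good (s t : List Char) (i : Nat) (cur : List (Int × Int)) : Prop :=
  KSorted cur ∧ (∀ qc ∈ cur, qc.1 < (t.length : Int)) ∧
  (∀ j : Nat, j ≤ t.length → Scur cur (j : Int) = Pfun s t i j)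

theorem good_step (s t : List Char) (i : Nat) (cur : List (Int × Int))
    (hg : Good s t i cur) (ch : Char) (hch : ch = s.getD i ' ') :
    Good s t (i+1) ((posN t ch).map (fun k => (((k : Nat) : Int), Scur cur (k : Int)))) := by
  obtain ⟨hks, hbd, hsc⟩ := hg
  have hpw : (posN t ch).Pairwise (· < ·) :=
    (List.pairwise_lt_range).filter _
  have hmem : ∀ k ∈ posN t ch, k < t.length := by
    intro k hk
    have := List.mem_range.mp (List.mem_of_mem_filter hk)
    omega
  refine ⟨?_, ?_, ?_⟩
  · refine (List.pairwise_map).mpr (hpw.imp ?_)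
    intro a b h
    show ((a : Nat) : Int) < ((b : Nat) : Int)
    exact_mod_cast h
  · intro qc hqc
    obtain ⟨k, hk, rfl⟩ := List.mem_map.mp hqc
    show ((k : Nat) : Int) < ((t.length : Nat) : Int)
    exact_mod_cast hmem k hk
  · intro j hj
    rw [Scur, List.filter_map]
    have hpred : ∀ k : Nat,
        ((fun qc => decide (qc.1 < (j : Int))) ∘ (fun k : Nat => (((k : Nat) : Int), Scur cur (k : Int)))) k
          = decide (k < j) := by
      intro k
      simp [Function.comp]
    rw [List.filter_congr (fun k _ => hpred k)]
    have hrange : (List.range t.length).filter (fun k => decide (k < j)) = List.range j := by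
      rw [show t.length = j + (t.length - j) by omega, List.range_add, List.filter_append,
        List.filter_eq_self.mpr (fun a ha => by
          simp only [decide_eq_true_eq]
          exact List.mem_range.mp ha),
        List.filter_eq_nil_iff.mpr (fun a ha => by
          obtain ⟨x, _, rfl⟩ := List.mem_map.mp ha
          simp only [decide_eq_true_eq]
          omega)]
      simp
    have hflt : (posN t ch).filter (fun k => decide (k < j)) =
        (List.range j).filter (fun k => decide (t.getD k ' ' = ch)) := by
      rw [posN, List.filter_comm, hrange]
    rw [hflt, sumC, List.map_map]
    have hvals : ∀ k ∈ (List.range j).filter (fun k => decide (t.getD k ' ' = ch)),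
        ((fun qc : Int × Int => qc.2) ∘ (fun k : Nat => (((k : Nat) : Int), Scur cur (k : Int)))) k
          = Pfun s t i k := by
      intro k hk
      have hkj : k < j := List.mem_range.mp (List.mem_of_mem_filter hk)
      exact hsc k (by omega)
    rw [List.map_congr_left hvals, hch, sum_posN]

-- B's fold over the skipgram characters, from position i on
theorem bchain (s t : List Char)
    (pos : PySem.Dict Char (List Int))
    (hpos : ∀ ch, pos.getD ch [] = (posN t ch).map (fun k => ((k : Nat) : Int))) :
    ∀ (u : List Char) (i : Nat) (cur : List (Int × Int)),
    s.drop i = u → Good s t i cur →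
    Good s t (i + u.length)
      (u.foldl (fun cur ch =>
          ((pos.getD ch []).foldl
            (fun acc p =>
              let r := pvAdvance acc.2.1 acc.2.2 p
              (acc.1 ++ [(p, r.2)], r.1, r.2))
            (([] : List (Int × Int)), cur, (0 : Int))).1) cur) := by
  intro u
  induction u with
  | nil =>
    intro i cur _ hg
    simpa using hg
  | cons ch u' ih =>
    intro i cur hdrop hg
    have hilt : i < s.length := by
      by_contra hge
      rw [List.drop_eq_nil_of_le (by omega)] at hdrop
      exact absurd hdrop (by simp)
    have hch : ch = s.getD i ' ' := by
      have h0 : (s.drop i)[0]? = some ch := by rw [hdrop]; rfl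
      rw [List.getElem?_drop] at h0
      simp only [Nat.add_zero] at h0
      simp [List.getD_eq_getElem?_getD, h0]
    have hdrop' : s.drop (i+1) = u' := by
      have := congrArg (List.drop 1) hdrop
      simpa [List.drop_drop, Nat.add_comm] using this
    simp only [List.foldl_cons]
    have hpw : ((posN t ch).map (fun k => ((k : Nat) : Int))).Pairwise (· < ·) := by
      refine (List.pairwise_map).mpr (((List.pairwise_lt_range).filter _).imp ?_)
      intro a b h
      exact_mod_cast h
    have hstep := inner_spec cur hg.1 ((posN t ch).map (fun k => ((k : Nat) : Int)))
      [] cur [] (List.nil_append cur).symm hpw (by intro p _ qc hqc; simp at hqc)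
    simp only [show sumC [] = (0 : Int) from rfl, List.nil_append, List.map_map] at hstep
    rw [hpos ch, hstep]
    have hg' := good_step s t i cur hg ch hch
    have := ih (i+1) _ hdrop' (by
      convert hg' using 2)
    simpa [Nat.add_comm, Nat.add_assoc, Nat.add_left_comm] using this

-- per-text value of B agrees with Pfun
theorem perTextB (s t : List Char) :
    (let pos := (PySem.List.enumerate t 0).foldl
        (fun d ic => d.modify ic.2 ([] : List Int) (fun l => l ++ [ic.1])) PySem.Dict.empty
     let cur := s.foldl
        (fun cur ch =>
          ((pos.getD ch []).foldl
            (fun acc p =>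
              let r := pvAdvance acc.2.1 acc.2.2 p
              (acc.1 ++ [(p, r.2)], r.1, r.2))
            (([] : List (Int × Int)), cur, (0 : Int))).1)
        [((-1 : Int), (1 : Int))]
     cur.foldl (fun s pc => s + pc.2) 0) = Pfun s t s.length t.length := by
  have hg0 : Good s t 0 [((-1 : Int), (1 : Int))] := by
    refine ⟨List.pairwise_singleton _ _, ?_, ?_⟩
    · intro qc hqc
      simp at hqc
      rw [hqc]
      have : (0 : Int) ≤ (t.length : Int) := by exact_mod_cast Nat.zero_le _
      omega
    · intro j _
      have hdec : decide ((-1 : Int) < (j : Int)) = true := by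
        simp only [decide_eq_true_eq]
        have : (0 : Int) ≤ (j : Int) := by exact_mod_cast Nat.zero_le _
        omega
      simp only [Scur, List.filter_cons, List.filter_nil, hdec, if_true, Pfun_zero]
      rfl
  have hfinal := bchain s t _ (posChar t) s 0 _ (by simp : s.drop 0 = s) hg0
  obtain ⟨hks, hbd, hsc⟩ := hfinal
  dsimp only
  have := hsc t.length (le_refl _)
  rw [Nat.zero_add] at this
  rw [Scur, List.filter_eq_self.mpr (fun qc hqc => by
      simp only [decide_eq_true_eq]
      exact hbd qc hqc)] at this
  rw [← this, sumC]
  simpa using PySem.List.foldl_add _ (fun pc : Int × Int => pc.2) 0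

theorem foldl_add_congr {α : Type} (F G : α → Int) (h : ∀ x, F x = G x)
    (l : List α) : ∀ init : Int,
    l.foldl (fun tot x => tot + F x) init = l.foldl (fun tot x => tot + G x) init := by
  induction l with
  | nil => intro init; rfl
  | cons x xs ih => intro init; simp only [List.foldl_cons, h x, ih]

-- ===== VERDICT (by name: the statement is the Claim_ definition above) =====
theorem countSkip_spec : Claim_equal_countSkip := by
  unfold Claim_equal_countSkip
  intro skipgram texts _
  unfold Spec_countSkip countSkip countSkip_alt
  apply foldl_add_congr
  intro text
  exact (perText skipgram.toList text.toList).trans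
      (perTextB skipgram.toList text.toList).symm
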